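-- pv_equiv track=rewrite | github.com/krolikladoshka/solveit | yandex/lektioneinz.py | findmaxandsecond1
-- ===== SOURCE A (Python) =====
-- def findmaxandsecond1(seq):
--     if not seq:
--         return
--
--     prevmx, mx = max(seq[0], seq[1]), min(seq[0], seq[1])
--
--     for x in seq:
--         if x > mx:
--             prevmx = mx
--             mx = x
--         elif x > prevmx:
--             prevmx = x
--
--     return mx, prevmx
-- ===== SOURCE B (Python) =====
-- def findmaxandsecond1(seq):
--     if not seq:
--         return
--     s = sorted(seq, reverse=True)
--     return (s[0], s[1])
-- ===== Notes on version B (the rewrite author's own statement) =====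
-- stated objective: simpler
-- what changed: Replaces A's single-pass top-two tracking loop (with its swapped max/min initialisation) by sort-descending-then-take-first-two.
import Mathlib
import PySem

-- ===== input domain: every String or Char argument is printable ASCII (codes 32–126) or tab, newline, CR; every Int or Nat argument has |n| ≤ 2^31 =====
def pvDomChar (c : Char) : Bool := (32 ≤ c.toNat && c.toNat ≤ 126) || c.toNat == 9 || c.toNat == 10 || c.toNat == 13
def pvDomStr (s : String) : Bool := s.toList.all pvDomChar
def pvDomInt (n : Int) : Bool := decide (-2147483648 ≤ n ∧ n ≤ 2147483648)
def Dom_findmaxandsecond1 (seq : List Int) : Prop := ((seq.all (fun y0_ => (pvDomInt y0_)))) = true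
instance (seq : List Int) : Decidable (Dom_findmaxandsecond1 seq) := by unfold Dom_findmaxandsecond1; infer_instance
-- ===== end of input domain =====

-- B replaces A's single-pass top-two tracking loop by sorting descending and taking the
-- first two elements (objective: simpler); both raise IndexError on a length-1 input,
-- which Pre_ excludes.


-- ===== PORT A =====
-- the loop body of A: update (prevmx, mx) with x
def stepA (st : Int × Int) (x : Int) : Int × Int :=
  if x > st.2 then (st.2, x) else if x > st.1 then (x, st.2) else st

def findmaxandsecond1 (seq : List Int) : Option (Int × Int) :=
  if seq = [] then none
  else
    match PySem.List.pyGet? seq 0, PySem.List.pyGet? seq 1 with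
    | some a, some b =>
        -- prevmx, mx = max(seq[0], seq[1]), min(seq[0], seq[1]); then the for-loop
        let st := seq.foldl stepA (max a b, min a b)
        some (st.2, st.1)
    | _, _ => none  -- IndexError on seq[1] (length-1 input); excluded by Pre_

-- ===== PORT B =====
def findmaxandsecond1_alt (seq : List Int) : Option (Int × Int) :=
  if seq = [] then none
  else
    let s := PySem.List.sorted seq (fun x => x) true
    -- s[0], s[1]; a length-1 input makes s[1] an IndexError (none), excluded by Pre_
    (PySem.List.pyGet? s 0).bind fun x0 =>
      (PySem.List.pyGet? s 1).map fun x1 => (x0, x1)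

-- ===== PRECONDITION & SPEC =====
-- Pre_ excludes exactly length-1 inputs, on which both A and B raise IndexError.
def Pre_findmaxandsecond1 (seq : List Int) : Prop := seq.length ≠ 1
instance (seq : List Int) : Decidable (Pre_findmaxandsecond1 seq) := by unfold Pre_findmaxandsecond1; infer_instance
def pvWitness_findmaxandsecond1 : List Int := [3, 1, 4, 1, 5]

def Spec_findmaxandsecond1 (seq : List Int) (out : Option (Int × Int)) : Prop := out = findmaxandsecond1_alt seq
instance (seq : List Int) (out : Option (Int × Int)) : Decidable (Spec_findmaxandsecond1 seq out) := by unfold Spec_findmaxandsecond1; infer_instance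

-- ===== CLAIM (what is proved, stated in full; the proofs are below) =====
def Claim_equal_findmaxandsecond1 : Prop := ∀ (seq : List Int), Dom_findmaxandsecond1 seq → Pre_findmaxandsecond1 seq → Spec_findmaxandsecond1 seq (findmaxandsecond1 seq)

-- ===== LEMMAS AND PROOFS =====

-- stepA is commutative in the two successive inputs
lemma stepA_comm (st : Int × Int) (x y : Int) : stepA (stepA st x) y = stepA (stepA st y) x := by
  obtain ⟨p, m⟩ := st
  simp only [stepA]
  split_ifs <;> simp_all <;> omega

-- foldl stepA is invariant under permutation of the list
lemma foldl_stepA_perm {l1 l2 : List Int} (h : l1.Perm l2) :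
    ∀ init, l1.foldl stepA init = l2.foldl stepA init := by
  induction h with
  | nil => intro _; rfl
  | cons x _ ih => intro init; simp only [List.foldl_cons]; exact ih _
  | swap x y _ => intro init; simp only [List.foldl_cons]; rw [stepA_comm]
  | trans _ _ ih1 ih2 => intro init; rw [ih1, ih2]

-- folding over elements all ≤ the current second-max leaves the state fixed
lemma foldl_stepA_fixed (t : List Int) (p m : Int) (hpm : p ≤ m)
    (h : ∀ x ∈ t, x ≤ p) : t.foldl stepA (p, m) = (p, m) := by
  induction t with
  | nil => rfl
  | cons x t ih =>
      have hx : x ≤ p := h x (by simp)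
      have : stepA (p, m) x = (p, m) := by
        simp only [stepA]; split_ifs <;> first | rfl | (exfalso; omega)
      simp only [List.foldl_cons, this]
      exact ih (fun y hy => h y (by simp [hy]))

theorem findmaxandsecond1_spec : Claim_equal_findmaxandsecond1 := by
  intro seq _ hpre
  unfold Spec_findmaxandsecond1 findmaxandsecond1 findmaxandsecond1_alt
  match hseq : seq with
  | [] => simp
  | [a] => simp [Pre_findmaxandsecond1] at hpre
  | a :: b :: rest =>
    simp only [if_neg (by simp : ¬(a :: b :: rest = []))]
    -- the reverse-sorted list
    set s := PySem.List.sorted (a :: b :: rest) (fun x => x) true with hs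
    have hperm : s.Perm (a :: b :: rest) := PySem.List.sorted_perm _ _ _
    have hlen : s.length = rest.length + 2 := by
      simpa using hperm.length_eq
    have hsne : s ≠ [] := by intro h; rw [h] at hlen; simp at hlen
    obtain ⟨s0, s', hst0⟩ := List.exists_cons_of_ne_nil hsne
    have hs'ne : s' ≠ [] := by intro h; rw [hst0, h] at hlen; simp at hlen
    obtain ⟨s1, t, hst1⟩ := List.exists_cons_of_ne_nil hs'ne
    have hst : s = s0 :: s1 :: t := by rw [hst0, hst1]
    have hpw : s.Pairwise (fun u v => v ≤ u) := by
      simpa using PySem.List.sorted_pairwise_rev (xs := a :: b :: rest) (key := fun x => x)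
    rw [hst] at hpw
    have h01 : s1 ≤ s0 := (List.pairwise_cons.mp hpw).1 s1 (by simp)
    have hpw' := (List.pairwise_cons.mp hpw).2
    have h1t : ∀ x ∈ t, x ≤ s1 := (List.pairwise_cons.mp hpw').1
    have h0all : ∀ x ∈ (a :: b :: rest), x ≤ s0 := by
      intro x hx
      have hxs : x ∈ s0 :: s1 :: t := by rw [← hst]; exact hperm.mem_iff.mpr hx
      rcases List.mem_cons.mp hxs with rfl | hx'
      · exact le_refl _
      · rcases List.mem_cons.mp hx' with rfl | hx''
        · exact h01
        · exact le_trans (h1t _ hx'') h01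
    have ha0 : a ≤ s0 := h0all a (by simp)
    have hb0 : b ≤ s0 := h0all b (by simp)
    -- min a b ≤ s1 : otherwise a and b give two elements > s1, but s has at most one
    have hmin1 : min a b ≤ s1 := by
      by_contra hcon
      rw [not_le] at hcon
      have hcount := hperm.countP_eq (fun x => decide (s1 < x))
      have hc2 : 2 ≤ (a :: b :: rest).countP (fun x => decide (s1 < x)) := by
        simp only [List.countP_cons, decide_eq_true_eq]
        split_ifs <;> omega
      have hc1 : s.countP (fun x => decide (s1 < x)) ≤ 1 := by
        rw [hst]
        simp only [List.countP_cons]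
        have ht0 : t.countP (fun x => decide (s1 < x)) = 0 := by
          rw [List.countP_eq_zero]
          intro x hx
          simpa using not_lt.mpr (h1t x hx)
        simp only [ht0, decide_eq_true_eq]
        split_ifs <;> omega
      omega
    -- evaluate A's fold on the sorted list
    have hfold : (a :: b :: rest).foldl stepA (max a b, min a b) = (s1, s0) := by
      rw [foldl_stepA_perm hperm.symm, hst]
      have step1 : stepA (max a b, min a b) s0 = (min a b, s0) := by
        simp only [stepA]; split_ifs <;> simp_all <;> omega
      have step2 : stepA (min a b, s0) s1 = (s1, s0) := by
        simp only [stepA]; split_ifs <;> simp_all <;> omega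
      simp only [List.foldl_cons, step1, step2]
      exact foldl_stepA_fixed t s1 s0 h01 h1t
    have hA1 : PySem.List.pyGet? (a :: b :: rest) 0 = some a := by
      simpa using PySem.List.pyGet?_natCast (a :: b :: rest) 0
    have hA2 : PySem.List.pyGet? (a :: b :: rest) 1 = some b := by
      simpa using PySem.List.pyGet?_natCast (a :: b :: rest) 1
    have hB1 : PySem.List.pyGet? s 0 = some s0 := by
      rw [hst]; simpa using PySem.List.pyGet?_natCast (s0 :: s1 :: t) 0
    have hB2 : PySem.List.pyGet? s 1 = some s1 := by
      rw [hst]; simpa using PySem.List.pyGet?_natCast (s0 :: s1 :: t) 1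
    simp only [hA1, hA2, hB1, hB2, hfold, Option.bind_some, Option.map_some]

-- ===== VERDICT moved above (single theorem) =====
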